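-- pv_equiv track=rewrite | github.com/silentBit0/temp | crt2.py | crt_prepare
-- ===== SOURCE A (Python) =====
-- def egcd(a, b):
--     if b == 0:
--         return a, 1, 0
--     g, x1, y1 = egcd(b, a % b)
--     return g, y1, x1 - (a // b) * y1
--
-- def modinv(a, m):
--     g, x, _ = egcd(a, m)
--     if g != 1:
--         raise ValueError("No inverse for {} mod {}".format(a, m))
--     return x % m
--
-- def crt_prepare(moduli):
--     M = 1
--     for m in moduli:
--         M *= m
--     Mi, inv = [], []
--     for m in moduli:
--         Mi.append(M // m)
--     for i, m in enumerate(moduli):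
--         inv.append(modinv(Mi[i], m))
--     return M, Mi, inv
-- ===== SOURCE B (Python) =====
-- def crt_prepare(moduli):
--     M = 1
--     for m in moduli:
--         M *= m
--     Mi, inv = [], []
--     for m in moduli:
--         c = M // m
--         Mi.append(c)
--         old_r, r = c, m
--         old_s, s = 1, 0
--         while r != 0:
--             q = old_r // r
--             old_r, r = r, old_r - q * r
--             old_s, s = s, old_s - q * s
--         if old_r != 1:
--             raise ValueError("No inverse for {} mod {}".format(c, m))
--         inv.append(old_s % m)
--     return M, Mi, inv
-- ===== Notes on version B (the rewrite author's own statement) =====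
-- stated objective: alternative
-- what changed: The recursive egcd helper is replaced by an iterative extended-Euclid loop maintaining (old_r, r) and (old_s, s), and the separate cofactor and inverse passes are fused into a single loop over the moduli.
import Mathlib
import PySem

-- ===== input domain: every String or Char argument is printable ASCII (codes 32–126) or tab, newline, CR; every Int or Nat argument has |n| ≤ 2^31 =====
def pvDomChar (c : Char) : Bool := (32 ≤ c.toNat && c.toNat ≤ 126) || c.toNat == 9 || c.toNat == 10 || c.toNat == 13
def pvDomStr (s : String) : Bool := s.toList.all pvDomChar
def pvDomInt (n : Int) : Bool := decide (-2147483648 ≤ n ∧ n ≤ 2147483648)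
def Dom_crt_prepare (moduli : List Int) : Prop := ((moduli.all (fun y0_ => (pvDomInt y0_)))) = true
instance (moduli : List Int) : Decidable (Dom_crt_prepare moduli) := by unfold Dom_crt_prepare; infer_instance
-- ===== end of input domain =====

-- B replaces A's recursive egcd by an iterative extended Euclid and fuses the cofactor and
-- inverse loops into one pass (alternative decomposition; same asymptotic cost).

-- termination helper for both egcd ports (Python remainder shrinks in absolute value)
theorem pv_mod_natAbs_lt (a b : Int) (hb : b ≠ 0) : (PySem.Int.mod a b).natAbs < b.natAbs := by
  rcases lt_or_gt_of_ne hb with h | h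
  · have h1 := (PySem.Int.mod_neg_bounds a h).1
    have h2 := (PySem.Int.mod_neg_bounds a h).2
    omega
  · have h1 := PySem.Int.mod_nonneg a h
    have h2 := PySem.Int.mod_lt a h
    omega

-- ===== PORT A =====
def pvEgcd (a b : Int) : Int × Int × Int :=
  if hb : b = 0 then (a, 1, 0)
  else
    match pvEgcd b (PySem.Int.mod a b) with
    | (g, x1, y1) => (g, y1, x1 - PySem.Int.floordiv a b * y1)
termination_by b.natAbs
decreasing_by exact pv_mod_natAbs_lt a b hb

-- modinv; Python raises ValueError when g ≠ 1 — those inputs are excluded by Pre_, the port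
-- returns the junk value 0 there
def pvModinv (a m : Int) : Int :=
  match pvEgcd a m with
  | (g, x, _) => if g ≠ 1 then 0 else PySem.Int.mod x m

def crt_prepare (moduli : List Int) : Int × List Int × List Int :=
  let M := moduli.foldl (fun acc m => acc * m) 1
  let Mi := moduli.foldl (fun acc m => acc ++ [PySem.Int.floordiv M m]) []
  let inv := (PySem.List.enumerate moduli).foldl
      (fun acc p => acc ++ [pvModinv ((PySem.List.pyGet? Mi p.1).getD 0) p.2]) []
  (M, Mi, inv)

-- ===== PORT B =====
-- the while-loop of Source B: state (old_r, r, old_s, s)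
def pvEgcdLoop (oldr r olds s : Int) : Int × Int :=
  if hr : r = 0 then (oldr, olds)
  else
    let q := PySem.Int.floordiv oldr r
    pvEgcdLoop r (oldr - q * r) s (olds - q * s)
termination_by r.natAbs
decreasing_by
  have h := PySem.Int.floordiv_mul_add_mod oldr r
  have : oldr - PySem.Int.floordiv oldr r * r = PySem.Int.mod oldr r := by omega
  rw [this]; exact pv_mod_natAbs_lt oldr r hr

def crt_prepare_alt (moduli : List Int) : Int × List Int × List Int :=
  let M := moduli.foldl (fun acc m => acc * m) 1
  let p := moduli.foldl (fun (acc : List Int × List Int) m =>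
      let c := PySem.Int.floordiv M m
      let gx := pvEgcdLoop c m 1 0
      (acc.1 ++ [c], acc.2 ++ [if gx.1 ≠ 1 then 0 else PySem.Int.mod gx.2 m]))
    ([], [])
  (M, p.1, p.2)

-- ===== PRECONDITION & SPEC =====
-- Pre_ is exactly the set of inputs on which Python A returns: a zero modulus raises
-- ZeroDivisionError, and a non-positive or non-pairwise-coprime list makes modinv raise
-- ValueError (a negative modulus always yields a negative gcd in egcd).
def Pre_crt_prepare (moduli : List Int) : Prop :=
  (∀ m ∈ moduli, 1 ≤ m) ∧ moduli.Pairwise (fun a b => Int.gcd a b = 1)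
instance (moduli : List Int) : Decidable (Pre_crt_prepare moduli) := by unfold Pre_crt_prepare; infer_instance
def pvWitness_crt_prepare : List Int := [3, 5, 7]

def Spec_crt_prepare (moduli : List Int) (out : Int × List Int × List Int) : Prop := out = crt_prepare_alt moduli
instance (moduli : List Int) (out : Int × List Int × List Int) : Decidable (Spec_crt_prepare moduli out) := by unfold Spec_crt_prepare; infer_instance

-- ===== CLAIM (what is proved, stated in full; the proofs are below) =====
def Claim_equal_crt_prepare : Prop := ∀ (moduli : List Int), Dom_crt_prepare moduli → Pre_crt_prepare moduli → Spec_crt_prepare moduli (crt_prepare moduli)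

-- ===== LEMMAS AND PROOFS =====

-- the iterative loop computes the recursive egcd's gcd and the u,v-combination of its
-- Bézout coefficients (induction on a bound for |b|)
theorem pvEgcdLoop_eq_aux (n : Nat) : ∀ (a b u v : Int), b.natAbs ≤ n →
    pvEgcdLoop a b u v = ((pvEgcd a b).1, u * (pvEgcd a b).2.1 + v * (pvEgcd a b).2.2) := by
  induction n with
  | zero =>
      intro a b u v hn
      have hb : b = 0 := by omega
      subst hb
      rw [pvEgcdLoop, pvEgcd]; simp
  | succ n ih =>
      intro a b u v hn
      by_cases hb : b = 0
      · subst hb; rw [pvEgcdLoop, pvEgcd]; simp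
      · rw [pvEgcdLoop, pvEgcd]
        simp only [hb, dite_false]
        have hmod : a - PySem.Int.floordiv a b * b = PySem.Int.mod a b := by
          have h := PySem.Int.floordiv_mul_add_mod a b
          omega
        have hlt : (PySem.Int.mod a b).natAbs ≤ n := by
          have := pv_mod_natAbs_lt a b hb
          omega
        rw [hmod, ih b (PySem.Int.mod a b) v (u - PySem.Int.floordiv a b * v) hlt]
        rcases h : pvEgcd b (PySem.Int.mod a b) with ⟨g, x1, y1⟩
        simp only [Prod.mk.injEq]
        exact ⟨trivial, by ring⟩

theorem pvEgcdLoop_eq (a b u v : Int) :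
    pvEgcdLoop a b u v = ((pvEgcd a b).1, u * (pvEgcd a b).2.1 + v * (pvEgcd a b).2.2) :=
  pvEgcdLoop_eq_aux b.natAbs a b u v (le_refl _)

-- the fused entry of B equals A's modinv of the cofactor
theorem pv_entry_eq (c m : Int) :
    (if (pvEgcdLoop c m 1 0).1 = 1 then PySem.Int.mod (pvEgcdLoop c m 1 0).2 m else 0)
      = pvModinv c m := by
  rw [pvEgcdLoop_eq]
  unfold pvModinv
  rcases h : pvEgcd c m with ⟨g, x, y⟩
  simp

-- B's fused fold splits into the two mapped lists
theorem pv_fused_fold (M : Int) (xs : List Int) : ∀ (acc1 acc2 : List Int),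
    xs.foldl (fun (acc : List Int × List Int) m =>
      let c := PySem.Int.floordiv M m
      let gx := pvEgcdLoop c m 1 0
      (acc.1 ++ [c], acc.2 ++ [if gx.1 ≠ 1 then 0 else PySem.Int.mod gx.2 m])) (acc1, acc2)
    = (acc1 ++ xs.map (fun m => PySem.Int.floordiv M m),
       acc2 ++ xs.map (fun m => pvModinv (PySem.Int.floordiv M m) m)) := by
  induction xs with
  | nil => intro acc1 acc2; simp
  | cons x xs ih =>
      intro acc1 acc2
      simp only [List.foldl_cons, List.map_cons]
      rw [ih]
      simp [pv_entry_eq]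

-- A's inverse pass, mapped over enumerate with pyGet? into the cofactor list, is a plain map
theorem pv_enum_map (f : Int → Int) (xs : List Int) :
    (PySem.List.enumerate xs).map
      (fun p => pvModinv ((PySem.List.pyGet? (xs.map f) p.1).getD 0) p.2)
    = xs.map (fun m => pvModinv (f m) m) := by
  apply List.ext_getElem
  · simp [PySem.List.length_enumerate]
  · intro k h1 h2
    simp only [List.getElem_map, PySem.List.getElem_enumerate]
    have hk : ((0 : Int) + (k : Nat)) = ((k : Nat) : Int) := by omega
    rw [hk, PySem.List.pyGet?_natCast]
    have hlen : k < (xs.map f).length := by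
      simpa using h2
    simp [List.getElem?_eq_getElem hlen]

theorem pv_main (moduli : List Int) : crt_prepare moduli = crt_prepare_alt moduli := by
  unfold crt_prepare crt_prepare_alt
  simp only [PySem.List.foldl_append_singleton_eq_map, List.nil_append]
  rw [pv_fused_fold, pv_enum_map]
  simp

-- ===== VERDICT (by name: the statement is the Claim_ definition above) =====
theorem crt_prepare_spec : Claim_equal_crt_prepare := by
  intro moduli _ _
  unfold Spec_crt_prepare
  exact pv_main moduli
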